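-- pv_equiv track=rewrite | github.com/Alki45/Data_Structure_Problems_Solving | 1798-max-number-of-k-sum-pairs/1798-max-number-of-k-sum-pairs.py | maxOperations
-- ===== SOURCE A (Python) =====
-- from typing import List
--
-- def maxOperations(nums: List[int], k: int) -> int:
--     nums.sort()
--     left=0
--     right=len(nums)-1
--     count=0
--     while(left<right and right<len(nums)):
--         if(nums[left]+nums[right]==k):
--             count+=1
--             left+=1
--             right-=1
--         elif(nums[left]+nums[right]>k):
--             right-=1
--         else:
--             left+=1
--     return count
-- ===== SOURCE B (Python) =====
-- from typing import List
-- from collections import Counter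
--
-- def maxOperations(nums: List[int], k: int) -> int:
--     # Counter-based closed form: for each distinct value v, pair v with k-v.
--     # (Unlike A, this does not sort/mutate nums; the equivalence is about the return value.)
--     c = Counter(nums)
--     ans = 0
--     for v in c:
--         if 2 * v == k:
--             ans += c[v] // 2
--         elif v < k - v:
--             ans += min(c[v], c[k - v])
--     return ans
-- ===== Notes on version B (the rewrite author's own statement) =====
-- stated objective: alternative
-- what changed: Replaced sort + two-pointer sweep by a Counter built in one pass plus a closed-form sum of min(count(v), count(k-v)) over distinct values (count(k/2)//2 for the self-paired value); O(n) vs O(n log n) asymptotically, though CPython's C-level sort makes A comparable in practice; B also does not mutate nums.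
import Mathlib
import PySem

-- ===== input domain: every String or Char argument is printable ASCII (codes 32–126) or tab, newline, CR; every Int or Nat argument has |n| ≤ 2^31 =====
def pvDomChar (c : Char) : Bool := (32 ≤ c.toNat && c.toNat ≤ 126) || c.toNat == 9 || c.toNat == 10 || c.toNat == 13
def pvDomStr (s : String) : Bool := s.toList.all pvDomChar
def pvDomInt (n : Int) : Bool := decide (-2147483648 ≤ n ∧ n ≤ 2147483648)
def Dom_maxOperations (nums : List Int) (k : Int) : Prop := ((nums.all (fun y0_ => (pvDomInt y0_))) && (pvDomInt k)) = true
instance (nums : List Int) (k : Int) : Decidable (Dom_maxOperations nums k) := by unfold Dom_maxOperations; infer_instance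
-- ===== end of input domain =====

-- B replaces A's sort + two-pointer sweep by a one-pass Counter and a closed-form sum over
-- distinct values (min(count v, count (k-v)), count(k/2)//2 for the self-paired value);
-- A sorts nums in place, B does not mutate it — the equivalence proved is about the return value.


-- ===== PORT A =====
-- while(left<right and right<len(nums)) loop of A, on the sorted list s
def tpLoop (s : List Int) (k : Int) (left right count : Int) : Int :=
  if h : left < right ∧ right < (s.length : Int) then
    if PySem.List.pyGetD s left 0 + PySem.List.pyGetD s right 0 = k then
      tpLoop s k (left + 1) (right - 1) (count + 1)
    else if PySem.List.pyGetD s left 0 + PySem.List.pyGetD s right 0 > k then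
      tpLoop s k left (right - 1) count
    else
      tpLoop s k (left + 1) right count
  else count
termination_by (right - left).toNat
decreasing_by all_goals omega

def maxOperations (nums : List Int) (k : Int) : Int :=
  let s := PySem.List.sorted nums (fun x => x) false
  tpLoop s k 0 ((s.length : Int) - 1) 0

-- ===== PORT B =====
def maxOperations_alt (nums : List Int) (k : Int) : Int :=
  let c := PySem.Dict.counter nums
  c.keys.foldl (fun ans v =>
    if 2 * v = k then ans + PySem.Int.floordiv (c.getD v 0) 2
    else if v < k - v then ans + min (c.getD v 0) (c.getD (k - v) 0)
    else ans) 0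

-- ===== PRECONDITION & SPEC =====
def Spec_maxOperations (nums : List Int) (k : Int) (out : Int) : Prop := out = maxOperations_alt nums k
instance (nums : List Int) (k : Int) (out : Int) : Decidable (Spec_maxOperations nums k out) := by unfold Spec_maxOperations; infer_instance

-- ===== CLAIM (what is proved, stated in full; the proofs are below) =====
def Claim_equal_maxOperations : Prop := ∀ (nums : List Int) (k : Int), Dom_maxOperations nums k → Spec_maxOperations nums k (maxOperations nums k)

-- ===== LEMMAS AND PROOFS =====

-- the closed-form term both programs compute: pairs contributed by the distinct value v
def gTerm (l : List Int) (k v : Int) : Nat :=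
  if 2 * v = k then l.count v / 2
  else if v < k - v then min (l.count v) (l.count (k - v))
  else 0

def msum (l : List Int) (k : Int) : Nat := ∑ v ∈ l.toFinset, gTerm l k v

lemma gTerm_zero_of_not_mem (l : List Int) (k v : Int) (h : v ∉ l) : gTerm l k v = 0 := by
  have hc : l.count v = 0 := List.count_eq_zero.mpr h
  unfold gTerm; split_ifs <;> simp [hc]

lemma msum_eq_sum_superset (l : List Int) (k : Int) (S : Finset Int) (h : l.toFinset ⊆ S) :
    msum l k = ∑ v ∈ S, gTerm l k v := by
  unfold msum
  refine Finset.sum_subset h ?_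
  intro x _ hx
  exact gTerm_zero_of_not_mem l k x (by simpa using hx)

lemma count_consd (x v : Int) (m : List Int) :
    (x :: m).count v = m.count v + (if v = x then 1 else 0) := by
  by_cases h : v = x
  · simp [h, List.count_cons]
  · simp [h, List.count_cons]
    omega

lemma count_snocd (y v : Int) (m : List Int) :
    (m ++ [y]).count v = m.count v + (if v = y then 1 else 0) := by
  by_cases h : v = y
  · simp [h, List.count_append]
  · have h0 : List.count v [y] = 0 := List.count_eq_zero.mpr (by simp [h])
    simp [List.count_append, h0, h]

lemma msum_nil (k : Int) : msum [] k = 0 := by simp [msum]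

lemma msum_singleton (x k : Int) : msum [x] k = 0 := by
  simp [msum, gTerm]
  intro h1 h2
  exact List.count_eq_zero.mpr (by simp; omega)

lemma msum_pair (k x y : Int) (m : List Int) (hk : x + y = k) (hxy : x ≤ y) :
    msum (x :: m ++ [y]) k = msum m k + 1 := by
  have hx_mem : x ∈ (x :: m ++ [y]).toFinset := by simp
  have hsub : m.toFinset ⊆ (x :: m ++ [y]).toFinset := by
    intro v hv; simp at hv ⊢; tauto
  rw [msum, msum_eq_sum_superset m k _ hsub]
  rw [← Finset.add_sum_erase _ _ hx_mem, ← Finset.add_sum_erase _ _ hx_mem]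
  have hterm : gTerm (x :: m ++ [y]) k x = gTerm m k x + 1 := by
    unfold gTerm
    simp only [count_consd, count_snocd]
    split_ifs <;> omega
  have hrest : ∀ v ∈ (x :: m ++ [y]).toFinset.erase x,
      gTerm (x :: m ++ [y]) k v = gTerm m k v := by
    intro v hv
    have hvx : v ≠ x := (Finset.mem_erase.mp hv).1
    unfold gTerm
    simp only [count_consd, count_snocd]
    split_ifs <;> omega
  have hsum : (∑ v ∈ (x :: m ++ [y]).toFinset.erase x, gTerm (x :: m ++ [y]) k v)
      = ∑ v ∈ (x :: m ++ [y]).toFinset.erase x, gTerm m k v :=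
    Finset.sum_congr rfl hrest
  rw [hterm, hsum]
  omega

lemma msum_dropLast (k x y : Int) (m : List Int) (hk : k < x + y) (hxy : x ≤ y)
    (hmin : ∀ v ∈ m, x ≤ v) :
    msum (x :: m ++ [y]) k = msum (x :: m) k := by
  have hsub : (x :: m).toFinset ⊆ (x :: m ++ [y]).toFinset := by
    intro v hv; simp at hv ⊢; tauto
  rw [msum, msum_eq_sum_superset (x :: m) k _ hsub]
  apply Finset.sum_congr rfl
  intro v hv
  have hvm : v = x ∨ v = y ∨ v ∈ m := by simpa using hv
  have hxv : x ≤ v := by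
    rcases hvm with h | h | h
    · omega
    · omega
    · exact hmin v h
  unfold gTerm
  simp only [count_consd, count_snocd]
  split_ifs <;> omega

lemma msum_tail (k x y : Int) (m : List Int) (hk : x + y < k) (hxy : x ≤ y)
    (hmax : ∀ v ∈ m, v ≤ y) :
    msum (x :: m ++ [y]) k = msum (m ++ [y]) k := by
  have hkx_m : m.count (k - x) = 0 :=
    List.count_eq_zero.mpr (fun h => by have := hmax _ h; omega)
  have hsub : (m ++ [y]).toFinset ⊆ (x :: m ++ [y]).toFinset := by
    intro v hv; simp at hv ⊢; tauto
  rw [msum, msum_eq_sum_superset (m ++ [y]) k _ hsub]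
  apply Finset.sum_congr rfl
  intro v hv
  have hvm : v = x ∨ v = y ∨ v ∈ m := by simpa using hv
  have hvy : v ≤ y := by
    rcases hvm with h | h | h
    · omega
    · omega
    · exact hmax v h
  by_cases hvx : v = x
  · subst hvx
    unfold gTerm
    simp only [count_consd, count_snocd]
    split_ifs <;> omega
  · unfold gTerm
    simp only [count_consd, count_snocd]
    split_ifs <;> omega

lemma getD_append_middle (A B : List Int) (z : Int) : (A ++ z :: B).getD A.length 0 = z := by
  rw [List.getD_eq_getElem?_getD, List.getElem?_append_right (le_refl _)]
  simp

lemma tpLoop_eq (k : Int) : ∀ (n : Nat) (mid : List Int), mid.length = n →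
    mid.Pairwise (· ≤ ·) →
    ∀ (pre post : List Int) (c : Int),
    tpLoop (pre ++ mid ++ post) k (pre.length : Int)
      ((pre.length : Int) + (mid.length : Int) - 1) c = c + (msum mid k : Int) := by
  intro n
  induction n using Nat.strong_induction_on with
  | _ n ih =>
  intro mid hlen hpair pre post c
  by_cases hsmall : mid.length ≤ 1
  · rw [tpLoop, dif_neg (by
      rintro ⟨h1, -⟩
      omega)]
    rcases mid with _ | ⟨a, rest⟩
    · simp [msum_nil]
    · rcases rest with _ | ⟨b, rest2⟩
      · simp [msum_singleton]
      · simp at hsmall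
  · rw [not_le] at hsmall
    obtain ⟨x, rest, hmid⟩ : ∃ x rest, mid = x :: rest := by
      rcases mid with _ | ⟨x, rest⟩
      · exact absurd hsmall (by simp)
      · exact ⟨x, rest, rfl⟩
    subst hmid
    rcases List.eq_nil_or_concat rest with hr | ⟨m, y, hr⟩
    · subst hr
      simp only [List.length_cons, List.length_nil] at hsmall
      omega
    · rw [List.concat_eq_append] at hr
      subst hr
      simp only [← List.cons_append]
      have hn : m.length + 2 = n := by simpa using hlen
      have hlen2 : (x :: m ++ [y]).length = m.length + 2 := by simp
      have hxall : ∀ v ∈ m ++ [y], x ≤ v := (List.pairwise_cons.mp hpair).1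
      have hxy : x ≤ y := hxall y (by simp)
      have hminm : ∀ v ∈ m, x ≤ v := fun v hv => hxall v (by simp [hv])
      have hally : ∀ v ∈ x :: m, v ≤ y := by
        have h' := hpair
        rw [show x :: (m ++ [y]) = (x :: m) ++ [y] by simp, List.pairwise_append] at h'
        intro v hv; exact h'.2.2 v hv y (by simp)
      have hmaxm : ∀ v ∈ m, v ≤ y := fun v hv => hally v (by simp [hv])
      rw [tpLoop, dif_pos (by
        constructor
        · simp only [hlen2]; push_cast; omega
        · simp only [List.length_append, hlen2]; push_cast; omega)]
      have ha : PySem.List.pyGetD (pre ++ (x :: m ++ [y]) ++ post) ((pre.length : Nat) : Int) 0 = x := by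
        rw [PySem.List.pyGetD_natCast,
            show pre ++ (x :: m ++ [y]) ++ post = pre ++ x :: (m ++ [y] ++ post) by simp]
        exact getD_append_middle pre _ x
      have hb : PySem.List.pyGetD (pre ++ (x :: m ++ [y]) ++ post)
          ((pre.length : Int) + ((x :: m ++ [y]).length : Int) - 1) 0 = y := by
        rw [show ((pre.length : Int) + ((x :: m ++ [y]).length : Int) - 1)
              = (((pre ++ x :: m).length : Nat) : Int) by
            simp only [hlen2, List.length_append, List.length_cons]; push_cast; ring]
        rw [PySem.List.pyGetD_natCast,
            show pre ++ (x :: m ++ [y]) ++ post = (pre ++ x :: m) ++ y :: post by simp]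
        exact getD_append_middle _ _ y
      rw [ha, hb]
      split_ifs with h1 h2
      · -- nums[left] + nums[right] == k
        have hrec := ih m.length (by omega) m rfl
          (hpair.sublist ((List.sublist_append_left m [y]).cons x))
          (pre ++ [x]) (y :: post) (c + 1)
        rw [show (pre ++ [x]) ++ m ++ (y :: post) = pre ++ (x :: m ++ [y]) ++ post by simp] at hrec
        rw [show ((pre.length : Int) + 1) = (((pre ++ [x]).length : Nat) : Int) by simp,
            show ((pre.length : Int) + ((x :: m ++ [y]).length : Int) - 1 - 1)
              = ((((pre ++ [x]).length : Nat) : Int) + (((m.length : Nat)) : Int) - 1) by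
            simp only [hlen2, List.length_append, List.length_cons, List.length_nil]; push_cast; ring]
        rw [hrec, msum_pair k x y m h1 hxy]
        push_cast; ring
      · -- nums[left] + nums[right] > k
        have hrec := ih (m.length + 1) (by omega) (x :: m) (by simp)
          (hpair.sublist ((List.sublist_append_left m [y]).cons₂ x))
          pre (y :: post) c
        rw [show pre ++ (x :: m) ++ (y :: post) = pre ++ (x :: m ++ [y]) ++ post by simp] at hrec
        rw [show ((pre.length : Int) + ((x :: m ++ [y]).length : Int) - 1 - 1)
              = ((pre.length : Int) + (((x :: m).length : Nat) : Int) - 1) by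
            simp only [hlen2, List.length_cons]; push_cast; ring]
        rw [hrec, msum_dropLast k x y m (by omega) hxy hminm]
      · -- nums[left] + nums[right] < k
        have hrec := ih (m.length + 1) (by omega) (m ++ [y]) (by simp)
          (hpair.sublist (List.sublist_cons_self x (m ++ [y])))
          (pre ++ [x]) post c
        rw [show (pre ++ [x]) ++ (m ++ [y]) ++ post = pre ++ (x :: m ++ [y]) ++ post by simp] at hrec
        rw [show ((pre.length : Int) + 1) = (((pre ++ [x]).length : Nat) : Int) by simp,
            show ((pre.length : Int) + ((x :: m ++ [y]).length : Int) - 1)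
              = ((((pre ++ [x]).length : Nat) : Int) + ((((m ++ [y]).length : Nat)) : Int) - 1) by
            simp only [hlen2, List.length_append, List.length_cons, List.length_nil]; push_cast; ring]
        rw [hrec, msum_tail k x y m (by omega) hxy hmaxm]

lemma msum_perm (l l' : List Int) (k : Int) (h : l.Perm l') : msum l k = msum l' k := by
  unfold msum
  rw [List.toFinset_eq_of_perm _ _ h]
  apply Finset.sum_congr rfl
  intro v _
  unfold gTerm
  rw [h.count_eq, h.count_eq]

lemma maxOperations_eq_msum (nums : List Int) (k : Int) :
    maxOperations nums k = (msum nums k : Int) := by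
  unfold maxOperations
  have hpair : (PySem.List.sorted nums (fun x => x) false).Pairwise (· ≤ ·) := by
    simpa using PySem.List.sorted_pairwise nums (fun x => x)
  have hperm := PySem.List.sorted_perm nums (fun x => x) false
  have h := tpLoop_eq k (PySem.List.sorted nums (fun x => x) false).length
    (PySem.List.sorted nums (fun x => x) false) rfl hpair [] [] 0
  simp only [List.nil_append, List.append_nil, List.length_nil, Nat.cast_zero, zero_add] at h
  rw [h, msum_perm _ _ k hperm]

lemma cast_sum_map (L : List Int) (f : Int → Nat) :
    (((L.map f).sum : Nat) : Int) = (L.map (fun v => (f v : Int))).sum := by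
  push_cast
  rw [List.map_map]
  rfl

lemma alt_eq_msum (nums : List Int) (k : Int) :
    maxOperations_alt nums k = (msum nums k : Int) := by
  unfold maxOperations_alt
  simp only [PySem.Dict.keys_counter]
  have hfun : (fun (ans v : Int) =>
      if 2 * v = k then ans + PySem.Int.floordiv ((PySem.Dict.counter nums).getD v 0) 2
      else if v < k - v then
        ans + min ((PySem.Dict.counter nums).getD v 0) ((PySem.Dict.counter nums).getD (k - v) 0)
      else ans)
      = fun ans v => ans + (gTerm nums k v : Int) := by
    funext ans v
    simp only [PySem.Dict.getD_counter]
    unfold gTerm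
    split_ifs with h1 h2
    · have h2' : ((2 : Nat) : Int) = (2 : Int) := by norm_num
      rw [← h2', PySem.Int.floordiv_natCast]
    · rw [Nat.cast_min]
    · simp
  rw [hfun, PySem.List.foldl_add]
  have hnodup : (PySem.Set.ofList nums).Nodup := PySem.Set.nodup_ofList nums
  have hfs : nums.toFinset = (PySem.Set.ofList nums).toFinset := by
    apply Finset.ext
    intro a
    simp [PySem.Set.mem_ofList]
  have hms : msum nums k = ((PySem.Set.ofList nums).map (fun v => gTerm nums k v)).sum := by
    unfold msum
    rw [hfs]
    exact List.sum_toFinset _ hnodup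
  rw [hms, cast_sum_map, zero_add]

-- ===== VERDICT (by name: the statement is the Claim_ definition above) =====
theorem maxOperations_spec : Claim_equal_maxOperations := by
  intro nums k _
  unfold Spec_maxOperations
  rw [maxOperations_eq_msum, alt_eq_msum]
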